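-- pv_equiv track=rewrite | github.com/jps531/ms-hs-football-playoff-engine | scripts/simulate_region_finish.py | _collect_global_cuts
-- ===== SOURCE A (Python) =====
-- from collections import defaultdict
-- from collections.abc import Callable, Iterable
--
-- def _is_ge_key(k: str) -> bool:
--     """Return True if ``k`` is a margin-threshold key of the form ``'A>B_GEn'``."""
--     return "_GE" in k and ">" in k
--
-- def _parse_ge(k: str) -> tuple[str, int]:
--     """Split a GE key ``'A>B_GEn'`` into ``('A>B', n)``."""
--     base, _, thr = k.partition("_GE")
--     return base, int(thr)
--
-- def _collect_global_cuts(all_minterms: Iterable[dict[str, bool]]) -> dict[str, list[int]]: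
--     """Collect every distinct margin-threshold cut for each base across all minterms.
--
--     Scans every minterm for GE keys (e.g. ``'A>B_GE5'``) and plain win keys (implying
--     a cut at 1) so that later partitioning can produce airtight, non-overlapping bands
--     that cover the full input space.
--
--     Args:
--         all_minterms: Iterable of minterm dicts (variable name → boolean value).
--
--     Returns:
--         A dict mapping each base orientation string to a sorted list of integer cut
--         thresholds (always includes 1 when any information exists for that base).
--     """
--     cuts: dict[str, set] = defaultdict(set)
--     for m in all_minterms:
--         for k, v in m.items():
--             if _is_ge_key(k):
--                 base, t = _parse_ge(k)
--                 cuts[base].add(int(t))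
--             elif ">" in k and v is True:
--                 # base True implies [1, +inf), ensure we include 1 as a starting cut
--                 cuts[k].add(1)
--     # Always include 1 if there is any information for that base
--     out = {}
--     for base, s in cuts.items():
--         s.add(1)
--         out[base] = sorted(s)
--     return out
-- ===== SOURCE B (Python) =====
-- def _collect_global_cuts(all_minterms):
--     # Different decomposition: one pass emits flat (base, threshold) events and a
--     # first-touch rank; a single sort by (rank, threshold) makes groups contiguous
--     # and ascending, and one adjacent-dedup grouping pass builds the result.
--     pairs = []
--     rank = {}
--     for m in all_minterms:
--         for k, v in m.items():
--             if "_GE" in k and ">" in k: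
--                 pre, _, suf = k.partition("_GE")
--                 b, t = pre, int(suf)
--             elif ">" in k and v is True:
--                 b, t = k, 1
--             else:
--                 continue
--             pairs.append((b, t))
--             pairs.append((b, 1))  # any base with information gets the cut at 1
--             rank.setdefault(b, len(rank))
--     pairs.sort(key=lambda p: (rank[p[0]], p[1]))
--     out = {}
--     for b, t in pairs:
--         if b not in out:
--             out[b] = [t]
--         elif out[b][-1] != t:
--             out[b].append(t)
--     return out
-- ===== Notes on version B (the rewrite author's own statement) =====
-- stated objective: alternative
-- what changed: Replaces the dict-of-sets accumulation (defaultdict(set) filled in one pass, then per-base sorted(set)) by a flat event list: one pass emits (base,threshold) pairs plus a first-touch rank, a single sort by (rank,threshold) makes groups contiguous and ascending, and one adjacent-dedup grouping pass builds the result.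
import Mathlib
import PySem

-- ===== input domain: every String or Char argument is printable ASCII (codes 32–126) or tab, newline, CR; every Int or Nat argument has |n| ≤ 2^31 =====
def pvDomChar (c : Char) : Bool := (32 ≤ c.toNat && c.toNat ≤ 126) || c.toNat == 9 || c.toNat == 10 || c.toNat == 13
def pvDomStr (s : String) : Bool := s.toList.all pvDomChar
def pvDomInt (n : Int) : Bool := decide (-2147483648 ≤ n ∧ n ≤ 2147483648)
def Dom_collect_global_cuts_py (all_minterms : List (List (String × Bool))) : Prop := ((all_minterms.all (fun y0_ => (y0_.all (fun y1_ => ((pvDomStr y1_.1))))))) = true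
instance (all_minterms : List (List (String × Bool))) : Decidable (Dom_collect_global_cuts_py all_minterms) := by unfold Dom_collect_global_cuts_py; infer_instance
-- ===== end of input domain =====

-- B replaces A's dict-of-sets accumulation by a flat event list, one sort by
-- (first-touch rank, threshold) and an adjacent-dedup grouping pass (alternative
-- decomposition, same result).

-- ===== PORT A =====
-- _is_ge_key: "_GE" in k and ">" in k
def pvIsGeKey (k : String) : Bool := PySem.Str.isIn "_GE" k && PySem.Str.isIn ">" k

-- hand port of k.partition("_GE") → (before, after); exact whenever "_GE" occurs in k
-- (every caller guards with pvIsGeKey, so the separator is present)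
def pvPartitionGE (k : String) : String × String :=
  let cs := k.toList
  let i := (PySem.Chars.find cs ("_GE".toList)).toNat
  (String.ofList (cs.take i), String.ofList (cs.drop (i + 3)))

def collect_global_cuts_py (all_minterms : List (List (String × Bool))) : List (String × List Int) :=
  let cuts : PySem.Dict String (PySem.Set Int) :=
    all_minterms.foldl (fun cuts m =>
      m.foldl (fun cuts kv =>
        if pvIsGeKey kv.1 then
          -- int(thr): Pre_ excludes the keys where int() raises, so getD 0 is unreachable
          cuts.modify (pvPartitionGE kv.1).1 PySem.Set.empty
            (fun s => PySem.Set.add s ((PySem.Int.ofStr? (pvPartitionGE kv.1).2).getD 0))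
        else if PySem.Str.isIn ">" kv.1 && kv.2 then
          cuts.modify kv.1 PySem.Set.empty (fun s => PySem.Set.add s 1)
        else cuts) cuts) PySem.Dict.empty
  cuts.items.foldl (fun out p =>
    out ++ [(p.1, PySem.List.sorted (PySem.Set.add p.2 1) (fun x => x) false)]) []

-- ===== PORT B =====
def collect_global_cuts_py_alt (all_minterms : List (List (String × Bool))) : List (String × List Int) :=
  let st : List (String × Int) × PySem.Dict String Int :=
    all_minterms.foldl (fun st m =>
      m.foldl (fun st kv =>
        if pvIsGeKey kv.1 then
          (st.1 ++ [((pvPartitionGE kv.1).1, (PySem.Int.ofStr? (pvPartitionGE kv.1).2).getD 0),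
                    ((pvPartitionGE kv.1).1, 1)],
           st.2.setdefault (pvPartitionGE kv.1).1 (st.2.size : Int))
        else if PySem.Str.isIn ">" kv.1 && kv.2 then
          (st.1 ++ [(kv.1, 1), (kv.1, 1)], st.2.setdefault kv.1 (st.2.size : Int))
        else st) st) ([], PySem.Dict.empty)
  let pairs := st.1
  let rank := st.2
  -- rank[p[0]]: every base occurring in pairs is a key of rank, so getD's default is unreachable
  let sp := PySem.List.sorted2 pairs (fun p => rank.getD p.1 0) (fun p => p.2) false
  let out : PySem.Dict String (List Int) :=
    sp.foldl (fun out p =>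
      if out.contains p.1 = false then out.insert p.1 [p.2]
      else if PySem.List.pyGet? (out.getD p.1 []) (-1) ≠ some p.2 then
        out.modify p.1 [] (fun l => l ++ [p.2])
      else out) PySem.Dict.empty
  out.items

-- ===== PRECONDITION & SPEC =====
-- Pre_ excludes exactly the inputs where A raises: a key of the GE shape whose part
-- after the first "_GE" is not a valid int literal makes int(thr) raise ValueError.
def Pre_collect_global_cuts_py (all_minterms : List (List (String × Bool))) : Prop :=
  ∀ m ∈ all_minterms, ∀ kv ∈ m, pvIsGeKey kv.1 = true →
    (PySem.Int.ofStr? (pvPartitionGE kv.1).2).isSome = true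
instance (all_minterms : List (List (String × Bool))) : Decidable (Pre_collect_global_cuts_py all_minterms) := by
  unfold Pre_collect_global_cuts_py; infer_instance

def pvWitness_collect_global_cuts_py : (List (List (String × Bool))) :=
  [[("A>B_GE5", true), ("C>D", true), ("x", false)]]

def Spec_collect_global_cuts_py (all_minterms : List (List (String × Bool))) (out : List (String × List Int)) : Prop := out = collect_global_cuts_py_alt all_minterms
instance (all_minterms : List (List (String × Bool))) (out : List (String × List Int)) : Decidable (Spec_collect_global_cuts_py all_minterms out) := by unfold Spec_collect_global_cuts_py; infer_instance

-- ===== CLAIM (what is proved, stated in full; the proofs are below) =====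
def Claim_equal_collect_global_cuts_py : Prop := ∀ (all_minterms : List (List (String × Bool))), Dom_collect_global_cuts_py all_minterms → Pre_collect_global_cuts_py all_minterms → Spec_collect_global_cuts_py all_minterms (collect_global_cuts_py all_minterms)

-- ===== LEMMAS AND PROOFS =====

/-- The event a key/value pair contributes: a (base, threshold) pair, or nothing. -/
def pvEvent (kv : String × Bool) : Option (String × Int) :=
  if pvIsGeKey kv.1 then
    some ((pvPartitionGE kv.1).1, (PySem.Int.ofStr? (pvPartitionGE kv.1).2).getD 0)
  else if PySem.Str.isIn ">" kv.1 && kv.2 then some (kv.1, 1)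
  else none

/-- One inner-loop body skipping non-events. -/
def pvLift {σ α β : Type} (f : σ → α → σ) (g : β → Option α) : σ → β → σ :=
  fun s kv => match g kv with | some e => f s e | none => s

def pvEvs (all_minterms : List (List (String × Bool))) : List (String × Int) :=
  (all_minterms.flatMap id).filterMap pvEvent

def pvBases (all_minterms : List (List (String × Bool))) : List String :=
  PySem.Set.ofList ((pvEvs all_minterms).map (·.1))

def pvThrs (all_minterms : List (List (String × Bool))) (b : String) : List Int :=
  (((pvEvs all_minterms).filter (fun e => e.1 == b)).map (·.2))

def pvPairs (all_minterms : List (List (String × Bool))) : List (String × Int) :=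
  (pvEvs all_minterms).flatMap (fun e => [(e.1, e.2), (e.1, 1)])

def pvRank (all_minterms : List (List (String × Bool))) : PySem.Dict String Int :=
  (pvEvs all_minterms).foldl (fun r e => r.setdefault e.1 (r.size : Int)) PySem.Dict.empty

/-- The grouping loop body of B's last pass. -/
def pvGroupStep (out : PySem.Dict String (List Int)) (p : String × Int) : PySem.Dict String (List Int) :=
  if out.contains p.1 = false then out.insert p.1 [p.2]
  else if PySem.List.pyGet? (out.getD p.1 []) (-1) ≠ some p.2 then
    out.modify p.1 [] (fun l => l ++ [p.2])
  else out

/-- Adjacent dedup starting from a nonempty current list (the inner grouping loop). -/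
def pvGo (cur : List Int) : List Int → List Int
  | [] => cur
  | t :: ts => if PySem.List.pyGet? cur (-1) ≠ some t then pvGo (cur ++ [t]) ts else pvGo cur ts

def pvCollapse : List Int → List Int
  | [] => []
  | t :: ts => pvGo [t] ts

def pvGroup (all_minterms : List (List (String × Bool))) (b : String) : List (String × Int) :=
  PySem.List.sorted ((pvPairs all_minterms).filter (fun p => p.1 == b)) (fun p => p.2) false

-- ---- flattening the nested loops ----
theorem pv_foldl_inner {σ α β : Type} (f : σ → α → σ) (g : β → Option α) :
    ∀ (m : List β) (init : σ),
      m.foldl (pvLift f g) init = (m.filterMap g).foldl f init := by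
  intro m
  induction m with
  | nil => intro init; rfl
  | cons kv m ih =>
    intro init
    simp only [List.foldl_cons, List.filterMap_cons]
    cases h : g kv with
    | none =>
      rw [show pvLift f g init kv = init from by simp [pvLift, h]]
      exact ih init
    | some e =>
      rw [show pvLift f g init kv = f init e from by simp [pvLift, h]]
      simp only [List.foldl_cons]
      exact ih (f init e)

theorem pv_foldl_nested {σ α β : Type} (f : σ → α → σ) (g : β → Option α) :
    ∀ (all : List (List β)) (init : σ),
      all.foldl (fun s m => m.foldl (pvLift f g) s) init
        = ((all.flatMap id).filterMap g).foldl f init := by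
  intro all
  induction all with
  | nil => intro init; rfl
  | cons m all ih =>
    intro init
    simp only [List.foldl_cons, List.flatMap_cons, id, List.filterMap_append, List.foldl_append]
    rw [ih, pv_foldl_inner]

-- ---- characterisation of A ----
theorem pv_stepA_eq :
    (fun (cuts : PySem.Dict String (PySem.Set Int)) (kv : String × Bool) =>
      if pvIsGeKey kv.1 then
        cuts.modify (pvPartitionGE kv.1).1 PySem.Set.empty
          (fun s => PySem.Set.add s ((PySem.Int.ofStr? (pvPartitionGE kv.1).2).getD 0))
      else if PySem.Str.isIn ">" kv.1 && kv.2 then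
        cuts.modify kv.1 PySem.Set.empty (fun s => PySem.Set.add s 1)
      else cuts)
      = pvLift (fun (cuts : PySem.Dict String (PySem.Set Int)) (e : String × Int) =>
          cuts.modify e.1 PySem.Set.empty (fun s => PySem.Set.add s e.2)) pvEvent := by
  funext cuts kv
  unfold pvLift pvEvent
  split_ifs <;> rfl

theorem pv_getD_fold_modify (l : List (String × Int)) :
    ∀ (d : PySem.Dict String (PySem.Set Int)) (b : String),
      ((l.foldl (fun d e => d.modify e.1 PySem.Set.empty (fun s => PySem.Set.add s e.2)) d).getD b PySem.Set.empty)
        = ((l.filter (fun e => e.1 == b)).map (·.2)).foldl PySem.Set.add (d.getD b PySem.Set.empty) := by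
  induction l with
  | nil => intro d b; rfl
  | cons e l ih =>
    intro d b
    simp only [List.foldl_cons, List.filter_cons]
    by_cases hb : e.1 = b
    · subst hb
      simp only [BEq.rfl, if_pos]
      rw [ih]
      simp
    · have hbeq : (e.1 == b) = false := by simp [hb]
      simp only [hbeq, Bool.false_eq_true, if_neg, not_false_iff]
      rw [ih]
      rw [PySem.Dict.getD_modify]
      simp [Ne.symm hb]

theorem pv_A_char (all_minterms : List (List (String × Bool))) :
    collect_global_cuts_py all_minterms
      = (pvBases all_minterms).map (fun b =>
          (b, PySem.List.sorted (PySem.Set.add (PySem.Set.ofList (pvThrs all_minterms b)) 1) (fun x => x) false)) := by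
  have h0 : collect_global_cuts_py all_minterms
      = List.foldl (fun out p =>
          out ++ [(p.1, PySem.List.sorted (PySem.Set.add p.2 1) (fun x => x) false)]) []
          (all_minterms.foldl (fun cuts m =>
            m.foldl (fun cuts kv =>
              if pvIsGeKey kv.1 then
                cuts.modify (pvPartitionGE kv.1).1 PySem.Set.empty
                  (fun s => PySem.Set.add s ((PySem.Int.ofStr? (pvPartitionGE kv.1).2).getD 0))
              else if PySem.Str.isIn ">" kv.1 && kv.2 then
                cuts.modify kv.1 PySem.Set.empty (fun s => PySem.Set.add s 1)
              else cuts) cuts) PySem.Dict.empty).items := rfl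
  rw [h0, pv_stepA_eq]
  rw [pv_foldl_nested (σ := PySem.Dict String (PySem.Set Int)) (α := String × Int) (β := String × Bool)
    (fun cuts e => cuts.modify e.1 PySem.Set.empty (fun s => PySem.Set.add s e.2)) pvEvent]
  rw [show (all_minterms.flatMap id).filterMap pvEvent = pvEvs all_minterms from rfl]
  set evs := pvEvs all_minterms with hevs
  set cuts := evs.foldl (fun d e => d.modify e.1 PySem.Set.empty (fun s => PySem.Set.add s e.2)) PySem.Dict.empty with hcuts
  have hkeys : cuts.keys = pvBases all_minterms := by
    rw [hcuts]
    rw [PySem.Dict.keys_foldl_modify_key evs (fun e => e.1) PySem.Set.empty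
      (fun _ e => fun s => PySem.Set.add s e.2) PySem.Dict.empty]
    rw [PySem.Dict.keys_empty, pvBases, PySem.Set.ofList_eq_foldl, PySem.Set.update]
  have hnodup : cuts.keys.Nodup := by
    rw [hcuts]
    exact PySem.Dict.nodup_keys_foldl_modify_key evs (fun e => e.1) PySem.Set.empty
      (fun _ e => fun s => PySem.Set.add s e.2) PySem.Dict.empty (by simp [PySem.Dict.keys_empty])
  rw [PySem.List.foldl_append_singleton_eq_map
    (fun p : String × PySem.Set Int => (p.1, PySem.List.sorted (PySem.Set.add p.2 1) (fun x => x) false)) cuts.items []]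
  rw [PySem.Dict.items_eq_map_keys cuts hnodup PySem.Set.empty]
  rw [hkeys]
  simp only [List.nil_append, List.map_map]
  apply List.map_congr_left
  intro b _
  simp only [Function.comp]
  congr 1
  rw [hcuts, pv_getD_fold_modify]
  have : ((evs.filter (fun e => e.1 == b)).map (·.2)).foldl PySem.Set.add (PySem.Dict.empty.getD b PySem.Set.empty)
      = PySem.Set.ofList (pvThrs all_minterms b) := by
    rw [PySem.Set.ofList_eq_foldl]
    rfl
  rw [this]

-- ---- characterisation of B's first pass ----
theorem pv_stepB_eq :
    (fun (st : List (String × Int) × PySem.Dict String Int) (kv : String × Bool) =>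
      if pvIsGeKey kv.1 then
        (st.1 ++ [((pvPartitionGE kv.1).1, (PySem.Int.ofStr? (pvPartitionGE kv.1).2).getD 0),
                  ((pvPartitionGE kv.1).1, 1)],
         st.2.setdefault (pvPartitionGE kv.1).1 (st.2.size : Int))
      else if PySem.Str.isIn ">" kv.1 && kv.2 then
        (st.1 ++ [(kv.1, 1), (kv.1, 1)], st.2.setdefault kv.1 (st.2.size : Int))
      else st)
      = pvLift (fun (st : List (String × Int) × PySem.Dict String Int) (e : String × Int) =>
          (st.1 ++ [(e.1, e.2), (e.1, 1)], st.2.setdefault e.1 (st.2.size : Int))) pvEvent := by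
  funext st kv
  unfold pvLift pvEvent
  split_ifs <;> rfl

theorem pv_B_pass1 (all_minterms : List (List (String × Bool))) :
    (all_minterms.foldl (fun st m =>
      m.foldl (pvLift (fun (st : List (String × Int) × PySem.Dict String Int) (e : String × Int) =>
        (st.1 ++ [(e.1, e.2), (e.1, 1)], st.2.setdefault e.1 (st.2.size : Int))) pvEvent) st) ([], PySem.Dict.empty))
      = (pvPairs all_minterms, pvRank all_minterms) := by
  rw [pv_foldl_nested (σ := List (String × Int) × PySem.Dict String Int) (α := String × Int) (β := String × Bool)
    (fun st e => (st.1 ++ [(e.1, e.2), (e.1, 1)], st.2.setdefault e.1 (st.2.size : Int))) pvEvent]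
  rw [PySem.List.foldl_prod_mk (fun (l : List (String × Int)) (e : String × Int) => l ++ [(e.1, e.2), (e.1, 1)])
    (fun (r : PySem.Dict String Int) (e : String × Int) => r.setdefault e.1 (r.size : Int))
    ((all_minterms.flatMap id).filterMap pvEvent) [] PySem.Dict.empty]
  rw [PySem.List.foldl_append_eq_flatMap (fun (e : String × Int) => [(e.1, e.2), (e.1, 1)]) ((all_minterms.flatMap id).filterMap pvEvent) []]
  rfl

-- ---- Set.add on plain membership ----
theorem pv_set_add_of_mem {s : PySem.Set String} {x : String} (h : x ∈ s) :
    PySem.Set.add s x = s := by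
  unfold PySem.Set.add
  split
  · rfl
  · rename_i hc
    exfalso
    unfold PySem.Set.contains at hc
    simp at hc
    exact hc h

theorem pv_set_add_of_not_mem {s : PySem.Set String} {x : String} (h : x ∉ s) :
    PySem.Set.add s x = s ++ [x] := by
  unfold PySem.Set.add
  split
  · rename_i hc
    exfalso
    unfold PySem.Set.contains at hc
    simp at hc
    exact h hc
  · rfl

-- ---- rank: first-touch index ----
theorem pv_rank_fold (l : List (String × Int)) :
    ∀ (d : PySem.Dict String Int),
      d.keys.Nodup → d.size = d.keys.length →
      (∀ b ∈ d.keys, d.getD b 0 = (d.keys.idxOf b : Int)) →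
      (((l.foldl (fun r e => r.setdefault e.1 (r.size : Int)) d).keys
          = PySem.Set.update d.keys (l.map (·.1)))
        ∧ (l.foldl (fun r e => r.setdefault e.1 (r.size : Int)) d).keys.Nodup
        ∧ (l.foldl (fun r e => r.setdefault e.1 (r.size : Int)) d).size
            = (l.foldl (fun r e => r.setdefault e.1 (r.size : Int)) d).keys.length
        ∧ (∀ b ∈ (l.foldl (fun r e => r.setdefault e.1 (r.size : Int)) d).keys,
            (l.foldl (fun r e => r.setdefault e.1 (r.size : Int)) d).getD b 0
              = ((l.foldl (fun r e => r.setdefault e.1 (r.size : Int)) d).keys.idxOf b : Int))) := by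
  induction l with
  | nil =>
    intro d h1 h2 h3
    exact ⟨rfl, h1, h2, h3⟩
  | cons e l ih =>
    intro d h1 h2 h3
    simp only [List.foldl_cons, List.map_cons]
    have hupd : PySem.Set.update d.keys (e.1 :: l.map (·.1))
        = PySem.Set.update (PySem.Set.add d.keys e.1) (l.map (·.1)) := rfl
    by_cases hc : d.contains e.1 = true
    · have hd : d.setdefault e.1 (d.size : Int) = d := PySem.Dict.setdefault_of_contains d _ hc
      have hmem : e.1 ∈ d.keys := by
        rw [PySem.Dict.contains_eq_decide_mem_keys] at hc
        exact of_decide_eq_true hc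
      rw [hd, hupd, pv_set_add_of_mem hmem]
      exact ih d h1 h2 h3
    · have hcf : d.contains e.1 = false := by
        cases h : d.contains e.1
        · rfl
        · exact absurd h hc
      have hd : d.setdefault e.1 (d.size : Int) = d.insert e.1 (d.size : Int) :=
        PySem.Dict.setdefault_of_not_contains d _ hcf
      have hnmem : e.1 ∉ d.keys := by
        rw [PySem.Dict.contains_eq_decide_mem_keys] at hcf
        simpa using hcf
      have hkeys' : (d.insert e.1 (d.size : Int)).keys = d.keys ++ [e.1] :=
        PySem.Dict.keys_insert_of_not_contains d _ hcf
      rw [hd, hupd, pv_set_add_of_not_mem hnmem, ← hkeys']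
      refine ih _ ?_ ?_ ?_
      · rw [hkeys']
        simp [List.nodup_append, h1]
        intro a ha hae
        exact hnmem (hae ▸ ha)
      · have hit : (d.insert e.1 (d.size : Int)).items = d.items ++ [(e.1, (d.size : Int))] :=
          PySem.Dict.items_insert_of_not_contains d _ hcf
        have hsz : (d.insert e.1 (d.size : Int)).size = d.size + 1 := by
          rw [show (d.insert e.1 (d.size : Int)).size
            = (d.insert e.1 (d.size : Int)).items.length from rfl, hit]
          simp [PySem.Dict.size]
        rw [hsz, hkeys', h2]
        simp
      · intro b hb
        rw [hkeys'] at hb ⊢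
        rcases List.mem_append.mp hb with hb1 | hb2
        · have hne : b ≠ e.1 := fun h => hnmem (h ▸ hb1)
          rw [PySem.Dict.getD_insert, if_neg hne, h3 b hb1, List.idxOf_append, if_pos hb1]
        · have hbe : b = e.1 := by simpa using hb2
          subst hbe
          rw [PySem.Dict.getD_insert_self, List.idxOf_append, if_neg hnmem]
          simp [h2]

theorem pv_rank_props (all_minterms : List (List (String × Bool))) :
    (pvRank all_minterms).keys = pvBases all_minterms
      ∧ (∀ b ∈ pvBases all_minterms,
          (pvRank all_minterms).getD b 0 = ((pvBases all_minterms).idxOf b : Int)) := by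
  have h := pv_rank_fold (pvEvs all_minterms) PySem.Dict.empty
    (by simp [PySem.Dict.keys_empty])
    (by simp [PySem.Dict.size, PySem.Dict.keys_empty]; rfl)
    (by intro b hb; simp [PySem.Dict.keys_empty] at hb)
  have hkeys : (pvRank all_minterms).keys = pvBases all_minterms := by
    have h1 := h.1
    rw [PySem.Dict.keys_empty] at h1
    rw [pvRank, h1, pvBases, PySem.Set.ofList_eq_foldl, PySem.Set.update]
  refine ⟨hkeys, ?_⟩
  intro b hb
  have h4 := h.2.2.2
  rw [show (pvEvs all_minterms).foldl (fun r e => r.setdefault e.1 (r.size : Int)) PySem.Dict.empty = pvRank all_minterms from rfl] at h4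
  rw [hkeys] at h4
  exact h4 b hb

-- ---- sorted2 is sorted by the lexicographic key ----
theorem pv_sorted2_eq {α : Type} (xs : List α) (k1 k2 : α → Int) :
    PySem.List.sorted2 xs k1 k2 false
      = PySem.List.sorted xs (fun a => toLex (k1 a, k2 a)) false := by
  have h2 : PySem.List.sorted2 xs k1 k2 false
      = List.foldl (fun acc x => PySem.List.insertBy
          (fun a b => decide (k1 a < k1 b) || (!decide (k1 b < k1 a) && decide (k2 a < k2 b))) x acc) [] xs := rfl
  have hfun : (fun (a b : α) => decide (k1 a < k1 b) || (!decide (k1 b < k1 a) && decide (k2 a < k2 b)))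
      = (fun a b => decide ((toLex (k1 a, k2 a)) < toLex (k1 b, k2 b))) := by
    funext a b
    by_cases h1 : k1 a < k1 b
    · simp [h1, Prod.Lex.toLex_lt_toLex]
    · by_cases hlt : k1 b < k1 a
      · have hne : k1 a ≠ k1 b := ne_of_gt hlt
        simp [h1, hlt, Prod.Lex.toLex_lt_toLex, hne]
      · have heq : k1 a = k1 b := le_antisymm (not_lt.mp hlt) (not_lt.mp h1)
        simp [Prod.Lex.toLex_lt_toLex, heq]
  rw [h2, hfun, PySem.List.sorted_eq_foldl_insertBy]

-- ---- the partition permutation ----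
theorem pv_perm_flatMap_filter (ks : List String) :
    ∀ (xs : List (String × Int)), ks.Nodup → (∀ p ∈ xs, p.1 ∈ ks) →
      xs.Perm (ks.flatMap (fun b => xs.filter (fun p => p.1 == b))) := by
  induction ks with
  | nil =>
    intro xs _ hmem
    have : xs = [] := List.eq_nil_iff_forall_not_mem.mpr (fun p hp => by simpa using hmem p hp)
    simp [this]
  | cons k ks ih =>
    intro xs hnd hmem
    have hk : k ∉ ks := (List.nodup_cons.mp hnd).1
    have hnd' : ks.Nodup := (List.nodup_cons.mp hnd).2
    have hsplit : xs.Perm (xs.filter (fun p => p.1 == k) ++ xs.filter (fun p => !(p.1 == k))) :=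
      (List.filter_append_perm (fun p => p.1 == k) xs).symm
    have hmem' : ∀ p ∈ xs.filter (fun p => !(p.1 == k)), p.1 ∈ ks := by
      intro p hp
      rcases List.mem_filter.mp hp with ⟨hpx, hpk⟩
      have hm := hmem p hpx
      simp at hpk
      simpa [hpk] using hm
    have hih := ih (xs.filter (fun p => !(p.1 == k))) hnd' hmem'
    have hfeq : ∀ b ∈ ks, (xs.filter (fun p => !(p.1 == k))).filter (fun p => p.1 == b)
        = xs.filter (fun p => p.1 == b) := by
      intro b hb
      rw [List.filter_filter]
      apply List.filter_congr
      intro p _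
      by_cases hpb : p.1 = b
      · have hbk : ¬ b = k := fun hbk => hk (hbk ▸ hb)
        simp [hpb, hbk]
      · simp [hpb]
    have hflat : (ks.flatMap (fun b => (xs.filter (fun p => !(p.1 == k))).filter (fun p => p.1 == b)))
        = ks.flatMap (fun b => xs.filter (fun p => p.1 == b)) := List.flatMap_congr hfeq
    refine hsplit.trans ?_
    simp only [List.flatMap_cons]
    exact List.Perm.append_left _ (hflat ▸ hih)

theorem pv_flatMap_perm_congr {α β : Type} (ks : List α) (f g : α → List β)
    (h : ∀ b ∈ ks, (f b).Perm (g b)) : (ks.flatMap f).Perm (ks.flatMap g) := by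
  induction ks with
  | nil => simp
  | cons k ks ih =>
    simp only [List.flatMap_cons]
    exact (h k (by simp)).append (ih (fun b hb => h b (by simp [hb])))

theorem pv_pairwise_flatMap {α β : Type} {R : α → α → Prop} {le : β → β → Prop}
    (ks : List α) (f : α → List β)
    (h1 : ks.Pairwise R) (h2 : ∀ k ∈ ks, (f k).Pairwise le)
    (h3 : ∀ a ∈ ks, ∀ b ∈ ks, R a b → ∀ x ∈ f a, ∀ y ∈ f b, le x y) :
    (ks.flatMap f).Pairwise le := by
  induction ks with
  | nil => simp
  | cons k ks ih =>
    simp only [List.flatMap_cons]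
    rw [List.pairwise_append]
    refine ⟨h2 k (by simp), ?_, ?_⟩
    · exact ih (List.pairwise_cons.mp h1).2 (fun c hc => h2 c (by simp [hc]))
        (fun a ha b hb hr => h3 a (by simp [ha]) b (by simp [hb]) hr)
    · intro x hx y hy
      rcases List.mem_flatMap.mp hy with ⟨c, hc, hyc⟩
      exact h3 k (by simp) c (by simp [hc]) ((List.pairwise_cons.mp h1).1 c hc) x hx y hyc

-- ---- membership facts ----
theorem pv_mem_pairs (all_minterms : List (List (String × Bool))) (p : String × Int) :
    p ∈ pvPairs all_minterms ↔ ∃ e ∈ pvEvs all_minterms, p = (e.1, e.2) ∨ p = (e.1, 1) := by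
  simp only [pvPairs, List.mem_flatMap, List.mem_cons, List.not_mem_nil, or_false]

theorem pv_fst_mem_bases (all_minterms : List (List (String × Bool))) (p : String × Int)
    (hp : p ∈ pvPairs all_minterms) : p.1 ∈ pvBases all_minterms := by
  rcases (pv_mem_pairs all_minterms p).mp hp with ⟨e, he, h⟩
  have hfst : p.1 = e.1 := by rcases h with h | h <;> rw [h]
  rw [hfst, pvBases]
  exact (PySem.Set.mem_ofList _ _).mpr (List.mem_map.mpr ⟨e, he, rfl⟩)

theorem pv_exists_event (all_minterms : List (List (String × Bool))) (b : String)
    (hb : b ∈ pvBases all_minterms) : ∃ e ∈ pvEvs all_minterms, e.1 = b := by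
  rw [pvBases] at hb
  rcases List.mem_map.mp ((PySem.Set.mem_ofList _ _).mp hb) with ⟨e, he, hfst⟩
  exact ⟨e, he, hfst⟩

theorem pv_group_fst (all_minterms : List (List (String × Bool))) (b : String) :
    ∀ p ∈ pvGroup all_minterms b, p.1 = b := by
  intro p hp
  have := (PySem.List.mem_sorted _ _ _ _).mp hp
  have hf := (List.mem_filter.mp this).2
  simpa using hf

theorem pv_group_ne_nil (all_minterms : List (List (String × Bool))) (b : String)
    (hb : b ∈ pvBases all_minterms) : pvGroup all_minterms b ≠ [] := by
  rcases pv_exists_event all_minterms b hb with ⟨e, he, hfst⟩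
  intro hnil
  rw [pvGroup, PySem.List.sorted_eq_nil_iff] at hnil
  have hmem : (e.1, e.2) ∈ pvPairs all_minterms :=
    (pv_mem_pairs all_minterms _).mpr ⟨e, he, Or.inl rfl⟩
  have := List.filter_eq_nil_iff.mp hnil _ hmem
  simp [hfst] at this

-- ---- the sorted pair list is the concatenation of the per-base groups ----
theorem pv_sorted_pairs_eq_cand (all_minterms : List (List (String × Bool))) :
    PySem.List.sorted (pvPairs all_minterms)
        (fun p => toLex ((pvRank all_minterms).getD p.1 0, p.2)) false
      = (pvBases all_minterms).flatMap (pvGroup all_minterms) := by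
  obtain ⟨hrk, hrg⟩ := pv_rank_props all_minterms
  have hbnd : (pvBases all_minterms).Nodup := PySem.Set.nodup_ofList _
  have hmemb : ∀ p ∈ pvPairs all_minterms, p.1 ∈ pvBases all_minterms :=
    fun p hp => pv_fst_mem_bases all_minterms p hp
  have hkeyinj : ∀ p ∈ pvPairs all_minterms, ∀ q ∈ pvPairs all_minterms,
      toLex ((pvRank all_minterms).getD p.1 0, p.2) = toLex ((pvRank all_minterms).getD q.1 0, q.2) → p = q := by
    intro p hp q hq h
    have h' : ((pvRank all_minterms).getD p.1 0, p.2) = ((pvRank all_minterms).getD q.1 0, q.2) :=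
      congrArg (fun z => ofLex z) h
    have hr : (pvRank all_minterms).getD p.1 0 = (pvRank all_minterms).getD q.1 0 := by
      have := congrArg (fun (z : Int × Int) => z.1) h'
      simpa using this
    have ht : p.2 = q.2 := by
      have := congrArg (fun (z : Int × Int) => z.2) h'
      simpa using this
    have hb1 := hmemb p hp
    have hb2 := hmemb q hq
    rw [hrg p.1 hb1, hrg q.1 hb2] at hr
    have hidx : (pvBases all_minterms).idxOf p.1 = (pvBases all_minterms).idxOf q.1 := by
      exact_mod_cast hr
    have hfst : p.1 = q.1 := by
      have hl1 := List.idxOf_lt_length_of_mem hb1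
      have hl2 := List.idxOf_lt_length_of_mem hb2
      have g1 : (pvBases all_minterms)[(pvBases all_minterms).idxOf p.1]? = some p.1 := by
        rw [List.getElem?_eq_getElem hl1]
        exact congrArg some (List.getElem_idxOf hl1)
      have g2 : (pvBases all_minterms)[(pvBases all_minterms).idxOf q.1]? = some q.1 := by
        rw [List.getElem?_eq_getElem hl2]
        exact congrArg some (List.getElem_idxOf hl2)
      rw [hidx] at g1
      exact Option.some.inj (g1.symm.trans g2)
    exact Prod.ext_iff.mpr ⟨hfst, ht⟩
  have hcandmem : ∀ p ∈ (pvBases all_minterms).flatMap (pvGroup all_minterms), p ∈ pvPairs all_minterms := by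
    intro p hp
    rcases List.mem_flatMap.mp hp with ⟨c, _, hpc⟩
    have := (PySem.List.mem_sorted _ _ _ _).mp hpc
    exact (List.mem_filter.mp this).1
  apply List.Perm.eq_of_pairwise
    (le := fun p q : String × Int =>
      (toLex ((pvRank all_minterms).getD p.1 0, p.2)) ≤ toLex ((pvRank all_minterms).getD q.1 0, q.2))
  · intro a b ha hb hab hba
    exact hkeyinj a ((PySem.List.mem_sorted _ _ _ _).mp ha) b (hcandmem b hb) (le_antisymm hab hba)
  · exact PySem.List.sorted_pairwise _ _
  · -- pairwise of the candidate
    have hR : (pvBases all_minterms).Pairwise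
        (fun a c => (pvBases all_minterms).idxOf a < (pvBases all_minterms).idxOf c) := by
      rw [List.pairwise_iff_getElem]
      intro i j hi hj hij
      rw [List.Nodup.idxOf_getElem hbnd i hi, List.Nodup.idxOf_getElem hbnd j hj]
      exact hij
    apply pv_pairwise_flatMap (pvBases all_minterms) (pvGroup all_minterms) hR
    · intro k hk
      have hs := PySem.List.sorted_pairwise ((pvPairs all_minterms).filter (fun p => p.1 == k)) (fun p => p.2)
      refine List.Pairwise.imp_of_mem ?_ hs
      intro p q hp hq hle
      have hp1 : p.1 = k := pv_group_fst all_minterms k p hp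
      have hq1 : q.1 = k := pv_group_fst all_minterms k q hq
      rw [Prod.Lex.toLex_le_toLex]
      right
      exact ⟨by rw [hp1, hq1], hle⟩
    · intro a ha c hc hr x hx y hy
      have hx1 : x.1 = a := pv_group_fst all_minterms a x hx
      have hy1 : y.1 = c := pv_group_fst all_minterms c y hy
      rw [Prod.Lex.toLex_le_toLex]
      left
      rw [hx1, hy1, hrg a ha, hrg c hc]
      show ((pvBases all_minterms).idxOf a : Int) < ((pvBases all_minterms).idxOf c : Int)
      exact_mod_cast hr
  · exact (PySem.List.sorted_perm _ _ _).trans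
      ((pv_perm_flatMap_filter (pvBases all_minterms) (pvPairs all_minterms) hbnd hmemb).trans
        (pv_flatMap_perm_congr _ _ _ (fun b _ => (PySem.List.sorted_perm _ _ _).symm)))

-- ---- last element through pyGet? ----
theorem pv_pyGet_neg_one (l : List Int) : PySem.List.pyGet? l (-1) = l.getLast? := by
  cases l with
  | nil => rfl
  | cons x xs =>
    simp [PySem.List.pyGet?, PySem.List.pyIdx?, List.getLast?_eq_getElem?]

-- ---- the grouping loop ----
theorem pv_insert_getD_self (d : PySem.Dict String (List Int)) (b : String) (dflt : List Int)
    (hnd : d.keys.Nodup) (hc : d.contains b = true) : d.insert b (d.getD b dflt) = d := by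
  apply PySem.Dict.ext
  rw [PySem.Dict.items_insert_of_contains d _ hc]
  conv_rhs => rw [← List.map_id d.items]
  apply List.map_congr_left
  intro p hp
  by_cases hpb : (p.1 == b) = true
  · have hb : p.1 = b := by simpa using hpb
    have hval : d.getD p.1 dflt = p.2 :=
      PySem.Dict.getD_of_mem_items d (k := p.1) (v := p.2) (by simpa using hp) hnd dflt
    simp only [hpb, if_pos, id]
    rw [← hb, hval]
  · simp [hpb]

theorem pv_fold_group (G : List (String × Int)) :
    ∀ (out : PySem.Dict String (List Int)) (b : String) (cur : List Int),
      out.keys.Nodup → (∀ p ∈ G, p.1 = b) → out.contains b = true → out.getD b [] = cur →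
      G.foldl pvGroupStep out = out.insert b (pvGo cur (G.map (·.2))) := by
  induction G with
  | nil =>
    intro out b cur hnd _ hc hcur
    simp only [List.foldl_nil, List.map_nil, pvGo]
    rw [← hcur]
    exact (pv_insert_getD_self out b [] hnd hc).symm
  | cons p G ih =>
    intro out b cur hnd hall hc hcur
    have hpb : p.1 = b := hall p (by simp)
    simp only [List.foldl_cons, List.map_cons, pvGroupStep, hpb, hcur]
    rw [if_neg (by simp [hc])]
    by_cases hcd : PySem.List.pyGet? cur (-1) ≠ some p.2
    · rw [if_pos hcd]
      have hmod : out.modify b [] (fun l => l ++ [p.2]) = out.insert b (cur ++ [p.2]) := by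
        show out.insert b (out.getD b [] ++ [p.2]) = _
        rw [hcur]
      rw [hmod]
      have hnd' : (out.insert b (cur ++ [p.2])).keys.Nodup := by
        rw [PySem.Dict.keys_insert_of_contains out _ hc]
        exact hnd
      rw [ih (out.insert b (cur ++ [p.2])) b (cur ++ [p.2]) hnd'
        (fun q hq => hall q (by simp [hq]))
        (by rw [PySem.Dict.contains_insert]; simp)
        (PySem.Dict.getD_insert_self _ _ _ _)]
      rw [PySem.Dict.insert_insert_self]
      congr 1
      rw [pvGo, if_pos hcd]
    · rw [if_neg hcd]
      rw [ih out b cur hnd (fun q hq => hall q (by simp [hq])) hc hcur]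
      congr 1
      rw [pvGo, if_neg hcd]

theorem pv_fold_cand (f : String → List (String × Int)) :
    ∀ (ks : List String) (out : PySem.Dict String (List Int)),
      out.keys.Nodup → ks.Nodup → (∀ b ∈ ks, out.contains b = false) →
      (∀ b ∈ ks, f b ≠ [] ∧ ∀ p ∈ f b, p.1 = b) →
      ((ks.flatMap f).foldl pvGroupStep out).items
        = out.items ++ ks.map (fun b => (b, pvCollapse ((f b).map (·.2)))) := by
  intro ks
  induction ks with
  | nil => intro out _ _ _ _; simp
  | cons b ks ih =>
    intro out hnd hksnd hcont hgrp
    obtain ⟨hgne, hgall⟩ := hgrp b (by simp)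
    have hcb : out.contains b = false := hcont b (by simp)
    have hbnot : b ∉ out.keys := by
      rw [PySem.Dict.contains_eq_decide_mem_keys] at hcb
      simpa using hcb
    simp only [List.flatMap_cons, List.foldl_append, List.map_cons]
    obtain ⟨g, G, hgG⟩ : ∃ g G, f b = g :: G := by
      cases hfb : f b with
      | nil => exact absurd hfb hgne
      | cons g G => exact ⟨g, G, rfl⟩
    rw [hgG]
    have hgb : g.1 = b := hgall g (by rw [hgG]; simp)
    simp only [List.foldl_cons]
    have hstep1 : pvGroupStep out g = out.insert b [g.2] := by
      unfold pvGroupStep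
      rw [hgb, if_pos hcb]
    rw [hstep1]
    have hnd1 : (out.insert b [g.2]).keys.Nodup := by
      rw [PySem.Dict.keys_insert_of_not_contains out _ hcb]
      simp [List.nodup_append, hnd]
      intro a ha hab
      exact hbnot (hab ▸ ha)
    rw [pv_fold_group G (out.insert b [g.2]) b [g.2] hnd1
      (fun p hp => hgall p (by rw [hgG]; simp [hp]))
      (by rw [PySem.Dict.contains_insert]; simp)
      (PySem.Dict.getD_insert_self _ _ _ _)]
    rw [PySem.Dict.insert_insert_self]
    have hval : pvGo [g.2] (G.map (·.2)) = pvCollapse ((g :: G).map (·.2)) := by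
      simp [pvCollapse]
    rw [hval]
    have hcont2 : ∀ b' ∈ ks, (out.insert b (pvCollapse ((g :: G).map (·.2)))).contains b' = false := by
      intro b' hb'
      rw [PySem.Dict.contains_insert]
      have hne : b' ≠ b := fun h => (List.nodup_cons.mp hksnd).1 (h ▸ hb')
      simp [hne, hcont b' (by simp [hb'])]
    have hnd2 : (out.insert b (pvCollapse ((g :: G).map (·.2)))).keys.Nodup := by
      rw [PySem.Dict.keys_insert_of_not_contains out _ hcb]
      simp [List.nodup_append, hnd]
      intro a ha hab
      exact hbnot (hab ▸ ha)
    rw [ih (out.insert b (pvCollapse ((g :: G).map (·.2)))) hnd2 (List.nodup_cons.mp hksnd).2 hcont2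
      (fun b' hb' => hgrp b' (by simp [hb']))]
    rw [PySem.Dict.items_insert_of_not_contains out _ hcb]
    simp

-- ---- B characterised ----
theorem pv_B_char (all_minterms : List (List (String × Bool))) :
    collect_global_cuts_py_alt all_minterms
      = (pvBases all_minterms).map (fun b => (b, pvCollapse ((pvGroup all_minterms b).map (·.2)))) := by
  have h1 : collect_global_cuts_py_alt all_minterms
      = ((PySem.List.sorted2 (pvPairs all_minterms)
          (fun p => (pvRank all_minterms).getD p.1 0) (fun p => p.2) false).foldl
            pvGroupStep PySem.Dict.empty).items := by
    unfold collect_global_cuts_py_alt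
    rw [pv_stepB_eq, pv_B_pass1]
    rfl
  rw [h1, pv_sorted2_eq, pv_sorted_pairs_eq_cand]

  rw [pv_fold_cand (pvGroup all_minterms) (pvBases all_minterms) PySem.Dict.empty
    (by simp [PySem.Dict.keys_empty]) (PySem.Set.nodup_ofList _)
    (fun b _ => PySem.Dict.contains_empty b)
    (fun b hb => ⟨pv_group_ne_nil all_minterms b hb, pv_group_fst all_minterms b⟩)]
  rfl

-- ---- the adjacent-dedup loop computes the strictly increasing enumeration ----
theorem pv_go_spec :
    ∀ (ts cur : List Int) (L : Int), cur ≠ [] → cur.Pairwise (· < ·) →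
      cur.getLast? = some L → (∀ x ∈ cur, x ≤ L) → (∀ t ∈ ts, L ≤ t) → ts.Pairwise (· ≤ ·) →
      ((pvGo cur ts).Pairwise (· < ·) ∧ ∀ x, (x ∈ pvGo cur ts ↔ x ∈ cur ∨ x ∈ ts)) := by
  intro ts
  induction ts with
  | nil =>
    intro cur L h1 h2 _ _ _ _
    exact ⟨h2, by simp [pvGo]⟩
  | cons t ts ih =>
    intro cur L h1 h2 h3 h4 h5 h6
    have h6' := List.pairwise_cons.mp h6
    rw [pvGo]
    simp only [pv_pyGet_neg_one, h3]
    by_cases hLt : L = t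
    · subst hLt
      rw [if_neg (by simp)]
      obtain ⟨hp, hm⟩ := ih cur L h1 h2 h3 h4 (fun u hu => h5 u (by simp [hu])) h6'.2
      refine ⟨hp, fun x => ?_⟩
      rw [hm x]
      constructor
      · rintro (h | h)
        · exact Or.inl h
        · exact Or.inr (List.mem_cons_of_mem _ h)
      · rintro (h | h)
        · exact Or.inl h
        · rcases List.mem_cons.mp h with h' | h'
          · subst h'
            exact Or.inl (List.mem_of_getLast? h3)
          · exact Or.inr h'
    · have hlt : L < t := lt_of_le_of_ne (h5 t (by simp)) hLt
      rw [if_pos (by simp [hLt])]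
      have hpw : (cur ++ [t]).Pairwise (· < ·) := by
        rw [List.pairwise_append]
        refine ⟨h2, by simp, ?_⟩
        intro x hx y hy
        have hy' : y = t := by simpa using hy
        subst hy'
        exact lt_of_le_of_lt (h4 x hx) hlt
      obtain ⟨hp, hm⟩ := ih (cur ++ [t]) t (by simp) hpw List.getLast?_concat
        (by
          intro x hx
          rcases List.mem_append.mp hx with h | h
          · exact le_trans (h4 x h) (le_of_lt hlt)
          · have hx' : x = t := by simpa using h
            subst hx'
            exact le_refl x)
        h6'.1 h6'.2
      refine ⟨hp, fun x => ?_⟩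
      rw [hm x]
      simp only [List.mem_append, List.mem_cons]
      tauto

theorem pv_collapse_spec (ts : List Int) (hne : ts ≠ []) (hs : ts.Pairwise (· ≤ ·)) :
    (pvCollapse ts).Pairwise (· < ·) ∧ ∀ x, (x ∈ pvCollapse ts ↔ x ∈ ts) := by
  cases ts with
  | nil => exact absurd rfl hne
  | cons t ts =>
    have h6 := List.pairwise_cons.mp hs
    obtain ⟨hp, hm⟩ := pv_go_spec ts [t] t (by simp) (by simp) (by simp) (by simp) h6.1 h6.2
    refine ⟨hp, fun x => ?_⟩
    rw [pvCollapse, hm x]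
    simp [List.mem_cons]

-- ---- membership of the per-base threshold multiset ----
theorem pv_mem_group_ts (all_minterms : List (List (String × Bool))) (b : String)
    (hb : b ∈ pvBases all_minterms) (x : Int) :
    (x ∈ (pvGroup all_minterms b).map (·.2)) ↔ (x ∈ pvThrs all_minterms b ∨ x = 1) := by
  constructor
  · intro hx
    rcases List.mem_map.mp hx with ⟨p, hp, hpx⟩
    have hpmem := (PySem.List.mem_sorted _ _ _ _).mp hp
    have hpf := List.mem_filter.mp hpmem
    have hp1 : p.1 = b := by simpa using hpf.2
    rcases (pv_mem_pairs all_minterms p).mp hpf.1 with ⟨e, he, hcase⟩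
    rcases hcase with h | h
    · left
      rw [pvThrs]
      apply List.mem_map.mpr
      refine ⟨e, List.mem_filter.mpr ⟨he, ?_⟩, ?_⟩
      · have : e.1 = b := by rw [← hp1, h]
        simpa using this
      · rw [← hpx, h]
    · right
      rw [← hpx, h]
  · intro hx
    rcases hx with hx | hx
    · rcases List.mem_map.mp hx with ⟨e, he, hex⟩
      have hef := List.mem_filter.mp he
      have he1 : e.1 = b := by simpa using hef.2
      apply List.mem_map.mpr
      refine ⟨(e.1, e.2), ?_, hex⟩
      apply (PySem.List.mem_sorted _ _ _ _).mpr
      apply List.mem_filter.mpr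
      refine ⟨(pv_mem_pairs all_minterms _).mpr ⟨e, hef.1, Or.inl rfl⟩, by simpa using he1⟩
    · rcases pv_exists_event all_minterms b hb with ⟨e, he, hfst⟩
      apply List.mem_map.mpr
      refine ⟨(e.1, 1), ?_, hx.symm⟩
      apply (PySem.List.mem_sorted _ _ _ _).mpr
      apply List.mem_filter.mpr
      refine ⟨(pv_mem_pairs all_minterms _).mpr ⟨e, he, Or.inr rfl⟩, by simpa using hfst⟩

-- ---- per-base equality ----
theorem pv_col_eq (all_minterms : List (List (String × Bool))) (b : String)
    (hb : b ∈ pvBases all_minterms) :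
    PySem.List.sorted (PySem.Set.add (PySem.Set.ofList (pvThrs all_minterms b)) 1) (fun x => x) false
      = pvCollapse ((pvGroup all_minterms b).map (·.2)) := by
  have hne : (pvGroup all_minterms b).map (·.2) ≠ [] := by
    intro h
    exact pv_group_ne_nil all_minterms b hb (List.map_eq_nil_iff.mp h)
  have hsort : ((pvGroup all_minterms b).map (·.2)).Pairwise (· ≤ ·) := by
    have hs := PySem.List.sorted_pairwise ((pvPairs all_minterms).filter (fun p => p.1 == b)) (fun p => p.2)
    show ((PySem.List.sorted ((pvPairs all_minterms).filter (fun p => p.1 == b)) (fun p => p.2) false).map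
      (fun p => p.2)).Pairwise (· ≤ ·)
    exact List.pairwise_map.mpr hs
  obtain ⟨hplt, hmem⟩ := pv_collapse_spec _ hne hsort
  apply PySem.List.sorted_eq_of_perm_of_pairwise_lt
  · rw [List.perm_ext_iff_of_nodup (List.Pairwise.imp (fun h => ne_of_lt h) hplt)
      (PySem.Set.nodup_add _ 1 (PySem.Set.nodup_ofList _))]
    intro x
    rw [hmem x, pv_mem_group_ts all_minterms b hb x, PySem.Set.mem_add, PySem.Set.mem_ofList]
  · exact hplt

-- ---- main ----
theorem pv_main (all_minterms : List (List (String × Bool))) :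
    collect_global_cuts_py all_minterms = collect_global_cuts_py_alt all_minterms := by
  rw [pv_A_char, pv_B_char]
  apply List.map_congr_left
  intro b hb
  rw [pv_col_eq all_minterms b hb]

-- ===== VERDICT (by name: the statement is the Claim_ definition above) =====
theorem collect_global_cuts_py_spec : Claim_equal_collect_global_cuts_py := by
  intro all_minterms _ _
  unfold Spec_collect_global_cuts_py
  exact pv_main all_minterms
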